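-- pv_equiv track=rewrite | github.com/brownav/interview-cake | strings_and_arrays/even_consecutive_true.py | even_consecutive_true
-- ===== SOURCE A (Python) =====
-- def even_consecutive_true(nums):
--     consecutive_ones = 0
--
--     for i in range(len(nums)):
--         if nums[i] == 1:
--             consecutive_ones += 1
--
--         # if last elem is not a 0 we still need to verify even consecutive count before exiting
--         if nums[i] == 0 or i == len(nums) - 1:
--             if consecutive_ones % 2 != 0:
--                 return False
--             consecutive_ones = 0
--
--     return True
-- ===== SOURCE B (Python) =====
-- def even_consecutive_true(nums):
--     segments = []
--     current = []
--     for x in nums: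
--         if x == 0:
--             segments.append(current)
--             current = []
--         else:
--             current.append(x)
--     segments.append(current)
--     return all(seg.count(1) % 2 == 0 for seg in segments)
-- ===== Notes on version B (the rewrite author's own statement) =====
-- stated objective: alternative
-- what changed: B partitions the list into segments split at every 0 in one pass, then a second pass checks each segment contains an even number of 1s, instead of A's single indexed loop with a running counter and early return.
import Mathlib
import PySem

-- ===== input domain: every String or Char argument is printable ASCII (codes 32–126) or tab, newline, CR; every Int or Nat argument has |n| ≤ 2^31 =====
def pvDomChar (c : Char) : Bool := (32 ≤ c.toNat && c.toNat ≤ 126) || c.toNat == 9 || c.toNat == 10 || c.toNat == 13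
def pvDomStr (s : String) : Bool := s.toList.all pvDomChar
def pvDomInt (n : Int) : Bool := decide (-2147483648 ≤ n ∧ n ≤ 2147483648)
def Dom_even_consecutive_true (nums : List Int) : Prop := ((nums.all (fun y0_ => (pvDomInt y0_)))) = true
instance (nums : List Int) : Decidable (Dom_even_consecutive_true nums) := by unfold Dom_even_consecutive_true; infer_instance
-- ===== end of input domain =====

-- B splits the list into segments at every 0 and checks each segment's count of 1s is even
-- (two passes) instead of A's single indexed loop with a running counter; same cost, different decomposition.

-- ===== PORT A =====
-- the indexed for-loop of A: i runs over range(len(nums)), with early return False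
def evenConsecLoop (nums : List Int) (i : Nat) (c : Int) : Bool :=
  if h : i < nums.length then
    let c := if nums[i] = 1 then c + 1 else c
    if nums[i] = 0 ∨ i = nums.length - 1 then
      if ¬ (c % 2 = 0) then false
      else evenConsecLoop nums (i + 1) 0
    else evenConsecLoop nums (i + 1) c
  else true
termination_by nums.length - i

def even_consecutive_true (nums : List Int) : Bool :=
  evenConsecLoop nums 0 0

-- ===== PORT B =====
-- pass 1: split into segments at every 0 (trailing segment appended after the loop)
def evenConsecSegments (nums : List Int) : List (List Int) :=
  let p := nums.foldl
    (fun (p : List (List Int) × List Int) x =>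
      if x = 0 then (p.1 ++ [p.2], []) else (p.1, p.2 ++ [x]))
    ([], [])
  p.1 ++ [p.2]

-- pass 2: each segment has an even count of 1s
def even_consecutive_true_alt (nums : List Int) : Bool :=
  (evenConsecSegments nums).all (fun seg => PySem.List.count seg 1 % 2 == 0)

-- ===== PRECONDITION & SPEC =====
def Spec_even_consecutive_true (nums : List Int) (out : Bool) : Prop := out = even_consecutive_true_alt nums
instance (nums : List Int) (out : Bool) : Decidable (Spec_even_consecutive_true nums out) := by unfold Spec_even_consecutive_true; infer_instance

-- ===== CLAIM (what is proved, stated in full; the proofs are below) =====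
def Claim_equal_even_consecutive_true : Prop := ∀ (nums : List Int), Dom_even_consecutive_true nums → Spec_even_consecutive_true nums (even_consecutive_true nums)

-- ===== LEMMAS AND PROOFS =====

-- common reference semantics: run of a counter over the remaining list
def evenGo : List Int → Int → Bool
  | [], c => c % 2 == 0
  | x :: xs, c =>
    if x = 0 then (if ¬ (c % 2 = 0) then false else evenGo xs 0)
    else evenGo xs (if x = 1 then c + 1 else c)

theorem evenConsecLoop_eq_go (nums : List Int) (k : Nat) :
    ∀ (i : Nat) (c : Int), nums.length - i ≤ k → i < nums.length →
      evenConsecLoop nums i c = evenGo (nums.drop i) c := by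
  induction k with
  | zero => intro i c hk h; omega
  | succ k ih =>
    intro i c hk h
    rw [evenConsecLoop, dif_pos h, List.drop_eq_getElem_cons h]
    by_cases hlast : i = nums.length - 1
    · -- last index: drop (i+1) = []
      have hdrop : nums.drop (i + 1) = [] := List.drop_eq_nil_of_le (by omega)
      have htail : evenConsecLoop nums (i + 1) 0 = true := by
        rw [evenConsecLoop, dif_neg (by omega)]
      rw [if_pos (Or.inr hlast), htail]
      by_cases hz : nums[i] = 0
      · simp only [hz, evenGo, if_neg (by decide : ¬ (0:Int) = 1), hdrop]
        by_cases he : c % 2 = 0 <;> simp [he]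
      · rw [evenGo, if_neg hz, hdrop, evenGo]
        by_cases he : (if nums[i] = 1 then c + 1 else c) % 2 = 0 <;> simp [he]
    · by_cases hz : nums[i] = 0
      · rw [if_pos (Or.inl hz), evenGo, if_pos hz]
        simp only [hz, if_neg (by decide : ¬ (0:Int) = 1)]
        by_cases he : c % 2 = 0
        · rw [if_neg (by simpa using he), if_neg (by simpa using he)]
          exact ih (i + 1) 0 (by omega) (by omega)
        · rw [if_pos (by simpa using he), if_pos (by simpa using he)]
      · rw [if_neg (by tauto), evenGo, if_neg hz]
        exact ih (i + 1) _ (by omega) (by omega)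

-- the fold step of B, named for the proofs (definitionally the lambda in evenConsecSegments)
def evenStep (p : List (List Int) × List Int) (x : Int) : List (List Int) × List Int :=
  if x = 0 then (p.1 ++ [p.2], []) else (p.1, p.2 ++ [x])

def evenChk (seg : List Int) : Bool := PySem.List.count seg 1 % 2 == 0

-- a segment already in the accumulator survives the rest of the fold
theorem evenStep_mem (ys : List Int) :
    ∀ (s : List (List Int)) (c cur : List Int), cur ∈ s →
      cur ∈ (ys.foldl evenStep (s, c)).1 ++ [(ys.foldl evenStep (s, c)).2] := by
  induction ys with
  | nil => intro s c cur hm; simpa using Or.inl hm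
  | cons y ys ihy =>
    intro s c cur hm
    simp only [List.foldl_cons, evenStep]
    by_cases hy : y = 0
    · rw [if_pos hy]; exact ihy _ _ _ (by simp [hm])
    · rw [if_neg hy]; exact ihy _ _ _ hm

theorem evenChk_cast (n : Nat) : ((n % 2 == 0) : Bool) = (((n : Int) % 2 == 0) : Bool) := by
  rw [Bool.eq_iff_iff]
  simp only [beq_iff_eq]
  omega

-- the foldl invariant for B
theorem evenConsecFold_eq_go (xs : List Int) :
    ∀ (segs : List (List Int)) (cur : List Int),
      segs.all evenChk = true →
      ((xs.foldl evenStep (segs, cur)).1 ++ [(xs.foldl evenStep (segs, cur)).2]).all evenChk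
        = evenGo xs ((PySem.List.count cur 1 : Nat) : Int) := by
  induction xs with
  | nil =>
    intro segs cur hsegs
    simp only [List.foldl_nil, evenGo, List.all_append, List.all_cons, List.all_nil,
      hsegs, Bool.true_and, Bool.and_true, evenChk]
    exact evenChk_cast _
  | cons x xs ih =>
    intro segs cur hsegs
    simp only [List.foldl_cons, evenStep, evenGo]
    by_cases hx : x = 0
    · rw [if_pos hx, if_pos hx]
      by_cases he : ((PySem.List.count cur 1 : Nat) : Int) % 2 = 0
      · rw [if_neg (by simpa using he)]
        have hall : (segs ++ [cur]).all evenChk = true := by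
          simp only [List.all_append, List.all_cons, List.all_nil, hsegs, Bool.true_and,
            Bool.and_true, evenChk]
          rw [evenChk_cast]
          simpa using he
        simpa [PySem.List.count] using ih (segs ++ [cur]) [] hall
      · rw [if_pos (by simpa using he)]
        have hbad : evenChk cur = false := by
          simp only [evenChk]
          rw [evenChk_cast]
          exact beq_eq_false_iff_ne.mpr he
        have hmem := evenStep_mem xs (segs ++ [cur]) [] cur (by simp)
        exact List.all_eq_false.mpr ⟨cur, hmem, by simp [hbad]⟩
    · rw [if_neg hx, if_neg hx]
      have hcount : PySem.List.count (cur ++ [x]) 1 =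
          PySem.List.count cur 1 + (if x = 1 then 1 else 0) := by
        simp [PySem.List.count, List.count_append, List.count_singleton]
      by_cases h1 : x = 1
      · rw [if_pos h1, ih segs (cur ++ [x]) hsegs, hcount, if_pos h1]
        push_cast
        ring_nf
      · rw [if_neg h1, ih segs (cur ++ [x]) hsegs, hcount, if_neg h1]
        simp

theorem alt_eq_go (nums : List Int) :
    even_consecutive_true_alt nums = evenGo nums 0 := by
  have h := evenConsecFold_eq_go nums [] [] (by simp)
  simpa [even_consecutive_true_alt, evenConsecSegments, evenStep, evenChk,
    PySem.List.count] using h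

-- ===== VERDICT (by name: the statement is the Claim_ definition above) =====
theorem even_consecutive_true_spec : Claim_equal_even_consecutive_true := by
  intro nums _
  unfold Spec_even_consecutive_true
  rw [alt_eq_go]
  cases nums with
  | nil =>
    rw [even_consecutive_true, evenConsecLoop]
    simp [evenGo]
  | cons x xs =>
    rw [even_consecutive_true,
      evenConsecLoop_eq_go _ (x :: xs).length 0 0 (by omega) (by simp)]
    simp
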